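-- pv_equiv track=rewrite | github.com/Reeter35/Advent-2022 | Day 6/puzzle2.py | findMarker
-- ===== SOURCE A (Python) =====
-- PACKET_LENGTH=14
--
-- def findMarker(data):
--     s = set()
--     for i in range(len(data)-PACKET_LENGTH):
--         for j in range(PACKET_LENGTH):
--             s.add(data[i+j])
--         if(len(s)==PACKET_LENGTH):
--             marker=""
--             for j in range(4):
--                 marker = marker + data[i+j]
--
--             return marker,i+PACKET_LENGTH
--
--         s.clear()
--
--
--     return "", -1
-- ===== SOURCE B (Python) =====
-- PACKET_LENGTH = 14
--
-- def findMarker(data):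
--     n = len(data)
--     if n < 15:
--         return "", -1
--     freq = {}
--     distinct = 0
--     for c in data[:14]:
--         freq[c] = freq.get(c, 0) + 1
--         if freq[c] == 1:
--             distinct += 1
--     for i in range(n - 14):
--         if distinct == 14:
--             return data[i:i+4], i + 14
--         # slide the window: drop data[i], add data[i+14]
--         c0 = data[i]
--         freq[c0] -= 1
--         if freq[c0] == 0:
--             distinct -= 1
--         c1 = data[i+14]
--         freq[c1] = freq.get(c1, 0) + 1
--         if freq[c1] == 1:
--             distinct += 1
--     return "", -1
-- ===== Notes on version B (the rewrite author's own statement) =====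
-- stated objective: faster
-- what changed: Replaces the per-position rebuild of a 14-character set with a single sliding-window pass that maintains a character frequency map and a live distinct count, updated in O(1) per position.
import Mathlib
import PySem

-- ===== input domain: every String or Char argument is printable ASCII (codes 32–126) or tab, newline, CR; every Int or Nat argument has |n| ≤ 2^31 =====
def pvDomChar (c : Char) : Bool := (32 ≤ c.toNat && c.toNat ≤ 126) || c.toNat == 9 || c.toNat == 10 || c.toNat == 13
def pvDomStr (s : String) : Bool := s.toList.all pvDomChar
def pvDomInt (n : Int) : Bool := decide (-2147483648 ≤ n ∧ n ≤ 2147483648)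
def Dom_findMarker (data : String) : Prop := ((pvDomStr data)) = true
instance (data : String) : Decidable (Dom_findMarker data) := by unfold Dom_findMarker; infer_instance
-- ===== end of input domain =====

-- B replaces A's per-position rebuild of a 14-char set by one sliding pass with a
-- frequency map and a live distinct count (objective: faster, constant-factor).

-- ===== PORT A =====
-- data[i+j] is always in range here, so List.getD is exact (the default is never read).
def findMarkerScanA (l : List Char) : List Nat → String × Int
  | [] => ("", -1)
  | i :: rest =>
    let s : PySem.Set Char :=
      (List.range 14).foldl (fun s j => PySem.Set.add s (l.getD (i + j) ' ')) PySem.Set.empty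
    if PySem.Set.len s = 14 then
      (String.mk ((List.range 4).foldl (fun m j => m ++ [l.getD (i + j) ' ']) []), (i : Int) + 14)
    else
      findMarkerScanA l rest

def findMarker (data : String) : String × Int :=
  findMarkerScanA data.toList (List.range (data.toList.length - 14))

-- ===== PORT B =====
-- freq[c] = freq.get(c, 0) + 1 ; if freq[c] == 1: distinct += 1   (over data[:14])
def initCount (cs : List Char) : PySem.Dict Char Int × Int :=
  cs.foldl (fun fd c =>
    let f := fd.1.modify c 0 (· + 1)
    (f, if f.getD c 0 = 1 then fd.2 + 1 else fd.2)) (PySem.Dict.empty, 0)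

-- the sliding loop; freq[c0] -= 1 hits an existing key in every reachable state,
-- so Dict.modify with default 0 is exact here.
def slideScanB (l : List Char) (freq : PySem.Dict Char Int) (distinct : Int) :
    List Nat → String × Int
  | [] => ("", -1)
  | i :: rest =>
    if distinct = 14 then
      (String.mk (PySem.List.slice l (some (i : Int)) (some ((i : Int) + 4))), (i : Int) + 14)
    else
      let c0 := l.getD i ' '
      let f1 := freq.modify c0 0 (· - 1)
      let d1 := if f1.getD c0 0 = 0 then distinct - 1 else distinct
      let c1 := l.getD (i + 14) ' '
      let f2 := f1.modify c1 0 (· + 1)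
      let d2 := if f2.getD c1 0 = 1 then d1 + 1 else d1
      slideScanB l f2 d2 rest

def findMarker_alt (data : String) : String × Int :=
  let l := data.toList
  if l.length < 15 then ("", -1)
  else
    let fd := initCount (l.take 14)
    slideScanB l fd.1 fd.2 (List.range (l.length - 14))

-- ===== PRECONDITION & SPEC =====
def Spec_findMarker (data : String) (out : String × Int) : Prop := out = findMarker_alt data
instance (data : String) (out : String × Int) : Decidable (Spec_findMarker data out) := by unfold Spec_findMarker; infer_instance

-- ===== CLAIM (what is proved, stated in full; the proofs are below) =====
def Claim_equal_findMarker : Prop := ∀ (data : String), Dom_findMarker data → Spec_findMarker data (findMarker data)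

-- ===== LEMMAS AND PROOFS =====

-- the window of length 14 starting at i
def win (l : List Char) (i : Nat) : List Char := (l.drop i).take 14

lemma win_cons (l : List Char) (i : Nat) (h : i + 14 ≤ l.length) :
    win l i = l[i]'(by omega) :: (l.drop (i + 1)).take 13 := by
  unfold win
  rw [List.drop_eq_getElem_cons (by omega)]
  rfl

lemma win_next (l : List Char) (i : Nat) (h : i + 15 ≤ l.length) :
    win l (i + 1) = (l.drop (i + 1)).take 13 ++ [l[i + 14]'(by omega)] := by
  unfold win
  have := List.take_add_one (l := l.drop (i + 1)) (i := 13)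
  rw [this]
  congr 1
  rw [List.getElem?_eq_getElem (by simp; omega)]
  simp [List.getElem_drop]

lemma marker_map (l : List Char) (i : Nat) (h : i + 14 ≤ l.length) :
    (List.range 4).foldl (fun m j => m ++ [l.getD (i + j) ' ']) []
      = (l.drop i).take 4 := by
  rw [PySem.List.foldl_append_singleton_eq_map]
  apply List.ext_getElem
  · simp; omega
  · intro j h1 h2
    simp only [List.nil_append, List.getElem_map, List.getElem_range,
      List.getElem_take, List.getElem_drop]
    rw [List.getD_eq_getElem]

lemma slice4 (l : List Char) (i : Nat) :
    PySem.List.slice l (some (i : Int)) (some ((i : Int) + 4))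
      = (l.drop i).take 4 := by
  have : ((i : Int) + 4) = ((i + 4 : Nat) : Int) := by push_cast; ring
  rw [this, PySem.List.slice_natCast]
  congr 1
  omega

lemma win_map (l : List Char) (i : Nat) (h : i + 14 ≤ l.length) :
    (List.range 14).map (fun j => l.getD (i + j) ' ') = win l i := by
  apply List.ext_getElem
  · simp [win]; omega
  · intro j h1 h2
    simp only [List.getElem_map, List.getElem_range, win, List.getElem_take, List.getElem_drop]
    rw [List.getD_eq_getElem]

lemma len_ofList (xs : List Char) :
    ((PySem.Set.ofList xs).length : Int) = (xs.toFinset.card : Int) := by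
  have h1 : (PySem.Set.ofList xs).toFinset = xs.toFinset := by
    ext y; simp [List.mem_toFinset, PySem.Set.mem_ofList]
  have h2 := List.toFinset_card_of_nodup (PySem.Set.nodup_ofList xs)
  rw [← h2, h1]

lemma setlen_eq_card (l : List Char) (i : Nat) (h : i + 14 ≤ l.length) :
    PySem.Set.len ((List.range 14).foldl
        (fun s j => PySem.Set.add s (l.getD (i + j) ' ')) PySem.Set.empty)
      = ((win l i).toFinset.card : Int) := by
  have : ((List.range 14).foldl
        (fun s j => PySem.Set.add s (l.getD (i + j) ' ')) PySem.Set.empty)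
      = PySem.Set.ofList (win l i) := by
    rw [← win_map l i h, PySem.Set.ofList_eq_foldl, List.foldl_map]
    rfl
  rw [this]
  exact len_ofList _

lemma add_step (f : PySem.Dict Char Int) (d : Int) (T : List Char) (c : Char)
    (hf : ∀ x, f.getD x 0 = (T.count x : Int)) (hd : d = (T.toFinset.card : Int)) :
    (∀ x, (f.modify c 0 (· + 1)).getD x 0 = ((T ++ [c]).count x : Int)) ∧
    ((if (f.modify c 0 (· + 1)).getD c 0 = 1 then d + 1 else d)
        = ((T ++ [c]).toFinset.card : Int)) := by
  have hself : (f.modify c 0 (· + 1)).getD c 0 = (T.count c : Int) + 1 := by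
    rw [PySem.Dict.getD_modify_self, hf]
  have hcard : ((T ++ [c]).toFinset.card : Int)
      = if c ∈ T then (T.toFinset.card : Int) else (T.toFinset.card : Int) + 1 := by
    have : (T ++ [c]).toFinset = insert c T.toFinset := by
      ext y; simp
    rw [this]
    by_cases hc : c ∈ T
    · simp [Finset.insert_eq_self.2 (List.mem_toFinset.2 hc), hc]
    · rw [Finset.card_insert_of_notMem (by simpa using hc)]
      simp [hc]
  constructor
  · intro x
    rw [PySem.Dict.getD_modify]
    by_cases hx : x = c
    · subst hx; rw [if_pos rfl, hf, List.count_append]; simp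
    · rw [if_neg hx, hf, List.count_append]
      have : List.count x [c] = 0 := by simp [List.count_singleton]; exact fun h => hx h.symm
      rw [this]; simp
  · rw [hself, hcard, hd]
    by_cases hc : c ∈ T
    · have : T.count c ≠ 0 := by simpa [List.count_eq_zero] using hc
      rw [if_neg (by omega), if_pos hc]
    · have : T.count c = 0 := List.count_eq_zero.2 hc
      rw [this]
      simp [hc]

lemma initCount_spec (cs : List Char) :
    (∀ x, (initCount cs).1.getD x 0 = (cs.count x : Int)) ∧
    (initCount cs).2 = (cs.toFinset.card : Int) := by
  induction cs using List.reverseRecOn with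
  | nil => constructor <;> simp [initCount, PySem.Dict.getD]
  | append_singleton xs c ih =>
    obtain ⟨h1, h2⟩ := ih
    have step := add_step (initCount xs).1 (initCount xs).2 xs c h1 h2
    unfold initCount at *
    rw [List.foldl_append] at *
    simpa using step

lemma scan_eq (l : List Char) (k : Nat) : ∀ (i : Nat) (freq : PySem.Dict Char Int) (d : Int),
    i + k + 14 = l.length →
    (∀ x, freq.getD x 0 = ((win l i).count x : Int)) →
    d = ((win l i).toFinset.card : Int) →
    findMarkerScanA l (List.range' i k) = slideScanB l freq d (List.range' i k) := by
  induction k with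
  | zero => intro i freq d _ _ _; rfl
  | succ k ih =>
    intro i freq d hlen hf hd
    have hi14 : i + 14 ≤ l.length := by omega
    rw [List.range'_succ]
    simp only [findMarkerScanA, slideScanB]
    rw [setlen_eq_card l i hi14, ← hd]
    by_cases hc : d = 14
    · rw [if_pos hc, if_pos hc]
      refine Prod.ext ?_ rfl
      show String.mk _ = String.mk _
      rw [marker_map l i hi14, slice4]
    · rw [if_neg hc, if_neg hc]
      -- establish the invariants at i + 1
      have hi15 : i + 15 ≤ l.length := by omega
      set c0 := l.getD i ' ' with hc0
      set T : List Char := (l.drop (i + 1)).take 13 with hT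
      have hc0' : c0 = l[i]'(by omega) := by rw [hc0, List.getD_eq_getElem]
      have hwin : win l i = c0 :: T := by rw [hc0', hT]; exact win_cons l i hi14
      set f1 := freq.modify c0 0 (· - 1) with hf1
      have hf1' : ∀ x, f1.getD x 0 = (T.count x : Int) := by
        intro x
        rw [hf1, PySem.Dict.getD_modify]
        by_cases hx : x = c0
        · subst hx; rw [if_pos rfl, hf, hwin, List.count_cons_self]; push_cast; ring
        · rw [if_neg hx, hf, hwin]; simp [Ne.symm hx]
      set d1 := if f1.getD c0 0 = 0 then d - 1 else d with hd1
      have hd1' : d1 = (T.toFinset.card : Int) := by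
        have hcount : f1.getD c0 0 = (T.count c0 : Int) := hf1' c0
        have hdins : d = ((insert c0 T.toFinset).card : Int) := by
          rw [hd, hwin]; simp [List.toFinset_cons]
        rw [hd1, hcount]
        by_cases hm : c0 ∈ T
        · have : T.count c0 ≠ 0 := by simpa [List.count_eq_zero] using hm
          rw [if_neg (by exact_mod_cast this), hdins,
            Finset.insert_eq_self.2 (List.mem_toFinset.2 hm)]
        · have : T.count c0 = 0 := List.count_eq_zero.2 hm
          rw [this, if_pos (by norm_num), hdins,
            Finset.card_insert_of_notMem (by simpa using hm)]
          push_cast; ring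
      set c1 := l.getD (i + 14) ' ' with hc1
      have hc1' : c1 = l[i + 14]'(by omega) := by rw [hc1, List.getD_eq_getElem]
      have hwin' : win l (i + 1) = T ++ [c1] := by rw [hc1', hT]; exact win_next l i hi15
      obtain ⟨hstep1, hstep2⟩ := add_step f1 d1 T c1 hf1' hd1'
      exact ih (i + 1) (f1.modify c1 0 (· + 1))
        (if (f1.modify c1 0 (· + 1)).getD c1 0 = 1 then d1 + 1 else d1)
        (by omega) (fun x => by rw [hwin']; exact hstep1 x) (by rw [hwin']; exact hstep2)

-- ===== VERDICT (by name: the statement is the Claim_ definition above) =====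
theorem findMarker_spec : Claim_equal_findMarker := by
  intro data _
  unfold Spec_findMarker findMarker findMarker_alt
  set l := data.toList with hl
  by_cases h : l.length < 15
  · simp only [if_pos h]
    have : l.length - 14 = 0 := by omega
    rw [this]
    rfl
  · simp only [if_neg h]
    have h14 : (0 : Nat) + 14 ≤ l.length := by omega
    have hwin0 : win l 0 = l.take 14 := by simp [win]
    obtain ⟨hc, hd⟩ := initCount_spec (l.take 14)
    rw [List.range_eq_range']
    exact scan_eq l (l.length - 14) 0 _ _ (by omega)
      (by simpa [hwin0] using hc) (by simpa [hwin0] using hd)
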